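-- pv_equiv track=rewrite | github.com/WAN519/RetentionAgent | api/server.py | _infer_dept
-- ===== SOURCE A (Python) =====
-- def _infer_dept(role_name: str) -> str:
--     r = role_name.upper()
--     if "SALES" in r:
--         return "Sales"
--     if any(x in r for x in ("SOFTWARE", "ENGINEERING_MANAGER", "BUSINESS_ANALYST",
--                              "PRODUCT_MANAGER", "OPERATIONS_MANAGER")):
--         return "Engineering"
--     if any(x in r for x in ("DATA_SCIENTIST", "RESEARCH", "LABORATORY",
--                              "MANUFACTURING", "HEALTHCARE")):
--         return "Research & Ops"
--     if any(x in r for x in ("HR_", "HUMAN_RESOURCE")):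
--         return "HR"
--     return "General"
-- ===== SOURCE B (Python) =====
-- _KEYWORD_PRIORITY = {
--     "SALES": 0,
--     "SOFTWARE": 1, "ENGINEERING_MANAGER": 1, "BUSINESS_ANALYST": 1,
--     "PRODUCT_MANAGER": 1, "OPERATIONS_MANAGER": 1,
--     "DATA_SCIENTIST": 2, "RESEARCH": 2, "LABORATORY": 2,
--     "MANUFACTURING": 2, "HEALTHCARE": 2,
--     "HR_": 3, "HUMAN_RESOURCE": 3,
-- }
-- _DEPTS = ("Sales", "Engineering", "Research & Ops", "HR", "General")
--
-- def _infer_dept(role_name: str) -> str: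
--     # Score every keyword (its priority if present, else 4) and take the minimum.
--     r = role_name.upper()
--     best = min(pri if kw in r else 4 for kw, pri in _KEYWORD_PRIORITY.items())
--     return _DEPTS[best]
-- ===== Notes on version B (the rewrite author's own statement) =====
-- stated objective: alternative
-- what changed: Replaces the prioritized if-chain of grouped any() checks (first match wins, short-circuit) by scoring every keyword from a flat keyword-to-priority map (priority if present, sentinel 4 if not), taking the minimum score, and indexing a department tuple by it.
import Mathlib
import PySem

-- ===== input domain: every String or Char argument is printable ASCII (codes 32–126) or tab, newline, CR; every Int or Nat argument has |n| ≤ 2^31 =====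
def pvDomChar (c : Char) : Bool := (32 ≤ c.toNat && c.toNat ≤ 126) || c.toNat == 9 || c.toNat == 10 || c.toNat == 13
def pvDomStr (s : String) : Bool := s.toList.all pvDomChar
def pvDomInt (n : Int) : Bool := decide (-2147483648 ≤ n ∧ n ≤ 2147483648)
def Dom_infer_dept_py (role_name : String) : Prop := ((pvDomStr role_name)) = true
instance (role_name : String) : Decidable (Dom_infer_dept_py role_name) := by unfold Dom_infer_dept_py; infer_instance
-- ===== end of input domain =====

-- B replaces A's prioritized if-chain by a minimum over per-keyword priority scores from a flat map (alternative decomposition).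

-- ===== PORT A =====
def infer_dept_py (role_name : String) : String :=
  let r := PySem.Str.upper role_name
  if PySem.Str.isIn "SALES" r then "Sales"
  else if (["SOFTWARE", "ENGINEERING_MANAGER", "BUSINESS_ANALYST",
            "PRODUCT_MANAGER", "OPERATIONS_MANAGER"].any (fun x => PySem.Str.isIn x r)) then "Engineering"
  else if (["DATA_SCIENTIST", "RESEARCH", "LABORATORY",
            "MANUFACTURING", "HEALTHCARE"].any (fun x => PySem.Str.isIn x r)) then "Research & Ops"
  else if (["HR_", "HUMAN_RESOURCE"].any (fun x => PySem.Str.isIn x r)) then "HR"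
  else "General"

-- ===== PORT B =====
def keywordPriority : List (String × Nat) :=
  [("SALES", 0),
   ("SOFTWARE", 1), ("ENGINEERING_MANAGER", 1), ("BUSINESS_ANALYST", 1),
   ("PRODUCT_MANAGER", 1), ("OPERATIONS_MANAGER", 1),
   ("DATA_SCIENTIST", 2), ("RESEARCH", 2), ("LABORATORY", 2),
   ("MANUFACTURING", 2), ("HEALTHCARE", 2),
   ("HR_", 3), ("HUMAN_RESOURCE", 3)]

def depts : List String := ["Sales", "Engineering", "Research & Ops", "HR", "General"]

def infer_dept_py_alt (role_name : String) : String :=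
  let r := PySem.Str.upper role_name
  let scores := keywordPriority.map (fun kp => if PySem.Str.isIn kp.1 r then kp.2 else 4)
  -- min(generator): scores is nonempty, so min? is some and .getD 0 is never taken
  let best := (PySem.List.min? scores (fun x => x)).getD 0
  -- _DEPTS[best]: best is always in [0,4], so the index is in range and .getD "" is never taken
  (PySem.List.pyGet? depts (Int.ofNat best)).getD ""

-- ===== PRECONDITION & SPEC =====
def Spec_infer_dept_py (role_name : String) (out : String) : Prop := out = infer_dept_py_alt role_name
instance (role_name : String) (out : String) : Decidable (Spec_infer_dept_py role_name out) := by unfold Spec_infer_dept_py; infer_instance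

-- ===== CLAIM =====
def Claim_equal_infer_dept_py : Prop := ∀ (role_name : String), Dom_infer_dept_py role_name → Spec_infer_dept_py role_name (infer_dept_py role_name)

-- ===== LEMMAS AND PROOFS =====

-- ===== VERDICT =====
set_option maxHeartbeats 2000000 in
theorem infer_dept_py_spec : Claim_equal_infer_dept_py := by
  intro role_name _
  simp only [Spec_infer_dept_py, infer_dept_py, infer_dept_py_alt, keywordPriority, depts,
    List.map, List.any_cons, List.any_nil, Bool.or_false]
  generalize PySem.Str.isIn "SALES" (PySem.Str.upper role_name) = b1
  generalize PySem.Str.isIn "SOFTWARE" (PySem.Str.upper role_name) = b2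
  generalize PySem.Str.isIn "ENGINEERING_MANAGER" (PySem.Str.upper role_name) = b3
  generalize PySem.Str.isIn "BUSINESS_ANALYST" (PySem.Str.upper role_name) = b4
  generalize PySem.Str.isIn "PRODUCT_MANAGER" (PySem.Str.upper role_name) = b5
  generalize PySem.Str.isIn "OPERATIONS_MANAGER" (PySem.Str.upper role_name) = b6
  generalize PySem.Str.isIn "DATA_SCIENTIST" (PySem.Str.upper role_name) = b7
  generalize PySem.Str.isIn "RESEARCH" (PySem.Str.upper role_name) = b8
  generalize PySem.Str.isIn "LABORATORY" (PySem.Str.upper role_name) = b9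
  generalize PySem.Str.isIn "MANUFACTURING" (PySem.Str.upper role_name) = b10
  generalize PySem.Str.isIn "HEALTHCARE" (PySem.Str.upper role_name) = b11
  generalize PySem.Str.isIn "HR_" (PySem.Str.upper role_name) = b12
  generalize PySem.Str.isIn "HUMAN_RESOURCE" (PySem.Str.upper role_name) = b13
  revert b1 b2 b3 b4 b5 b6 b7 b8 b9 b10 b11 b12 b13
  decide
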